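-- pv_equiv track=rewrite | github.com/pohily/checkio | two_teams.py | two_teams
-- ===== SOURCE A (Python) =====
-- def two_teams(sailors):
--     boats = [[], []]
--     for sailor in sailors:
--         if 20 <= sailors[sailor] <= 40:
--             boats[1].append(sailor)
--         else:
--             boats[0].append(sailor)
--         boats[0].sort()
--         boats[1].sort()
--     return boats
-- ===== SOURCE B (Python) =====
-- def two_teams(sailors):
--     order = sorted(sailors)
--     return [[k for k in order if not 20 <= sailors[k] <= 40],
--             [k for k in order if 20 <= sailors[k] <= 40]]
-- ===== Notes on version B (the rewrite author's own statement) =====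
-- stated objective: faster
-- what changed: B sorts the keys once and builds each boat directly as a filtered comprehension of the sorted key list (no mutable boats, no per-iteration re-sorting), replacing A's loop that appends and re-sorts both boats each step.
import Mathlib
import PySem

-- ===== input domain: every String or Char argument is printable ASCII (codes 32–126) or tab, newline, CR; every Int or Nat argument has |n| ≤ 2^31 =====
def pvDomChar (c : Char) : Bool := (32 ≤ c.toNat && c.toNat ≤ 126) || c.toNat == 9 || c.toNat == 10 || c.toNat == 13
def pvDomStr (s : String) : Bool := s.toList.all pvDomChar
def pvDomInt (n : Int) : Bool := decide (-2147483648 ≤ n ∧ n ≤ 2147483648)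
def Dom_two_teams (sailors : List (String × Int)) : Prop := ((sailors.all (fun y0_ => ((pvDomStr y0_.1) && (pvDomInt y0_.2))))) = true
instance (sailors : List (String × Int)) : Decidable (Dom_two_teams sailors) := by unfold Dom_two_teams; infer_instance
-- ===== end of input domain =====

-- B sorts the keys once and builds each boat as a filter of the sorted key list, instead of A's loop that appends and re-sorts both boats each iteration; same return value, asymptotically faster.


-- ===== PORT A =====
-- 'for sailor in sailors' iterates the dict's keys; both boats are re-sorted after every append.
def two_teams (sailors : List (String × Int)) : List (List String) :=
  let d := PySem.Dict.ofList sailors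
  let boats := d.keys.foldl
    (fun (b : List String × List String) sailor =>
      let b' := if 20 ≤ d.getD sailor 0 ∧ d.getD sailor 0 ≤ 40
                then (b.1, b.2 ++ [sailor]) else (b.1 ++ [sailor], b.2)
      (PySem.List.sorted b'.1 (fun x => x) false, PySem.List.sorted b'.2 (fun x => x) false))
    ([], [])
  [boats.1, boats.2]

-- ===== PORT B =====
-- keys sorted once; each boat is a filtered comprehension of the sorted key list.
def two_teams_alt (sailors : List (String × Int)) : List (List String) :=
  let d := PySem.Dict.ofList sailors
  let order := PySem.List.sorted d.keys (fun x => x) false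
  [order.filter (fun k => !decide (20 ≤ d.getD k 0 ∧ d.getD k 0 ≤ 40)),
   order.filter (fun k => decide (20 ≤ d.getD k 0 ∧ d.getD k 0 ≤ 40))]

-- ===== PRECONDITION & SPEC =====
def Spec_two_teams (sailors : List (String × Int)) (out : List (List String)) : Prop := out = two_teams_alt sailors
instance (sailors : List (String × Int)) (out : List (List String)) : Decidable (Spec_two_teams sailors out) := by unfold Spec_two_teams; infer_instance

-- ===== CLAIM (what is proved, stated in full; the proofs are below) =====
def Claim_equal_two_teams : Prop := ∀ (sailors : List (String × Int)), Dom_two_teams sailors → Spec_two_teams sailors (two_teams sailors)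

-- ===== LEMMAS AND PROOFS =====

-- A's loop, started on already-sorted accumulators, ends at the sort of the partitioned whole.
theorem foldlA_eq (P : String → Prop) [DecidablePred P] (l x y : List String) :
    l.foldl
      (fun (b : List String × List String) k =>
        let b' := if P k then (b.1, b.2 ++ [k]) else (b.1 ++ [k], b.2)
        (PySem.List.sorted b'.1 (fun s => s) false, PySem.List.sorted b'.2 (fun s => s) false))
      (PySem.List.sorted x (fun s => s) false, PySem.List.sorted y (fun s => s) false)
    = (PySem.List.sorted (x ++ l.filter (fun k => !decide (P k))) (fun s => s) false,
       PySem.List.sorted (y ++ l.filter (fun k => decide (P k))) (fun s => s) false) := by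
  induction l generalizing x y with
  | nil => simp
  | cons k t ih =>
    by_cases hk : P k
    · simp only [List.foldl_cons, if_pos hk]
      have h2 : PySem.List.sorted (PySem.List.sorted y (fun s => s) false ++ [k]) (fun s => s) false
          = PySem.List.sorted (y ++ [k]) (fun s => s) false := by
        exact PySem.List.sorted_eq_sorted_of_perm _ _ _ (fun a b h => h)
          ((PySem.List.sorted_perm y (fun s => s) false).append_right [k])
      simp only [PySem.List.sorted_sorted, h2]
      rw [ih x (y ++ [k])]
      simp [hk, List.append_assoc]
    · simp only [List.foldl_cons, if_neg hk]
      have h1 : PySem.List.sorted (PySem.List.sorted x (fun s => s) false ++ [k]) (fun s => s) false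
          = PySem.List.sorted (x ++ [k]) (fun s => s) false := by
        exact PySem.List.sorted_eq_sorted_of_perm _ _ _ (fun a b h => h)
          ((PySem.List.sorted_perm x (fun s => s) false).append_right [k])
      simp only [PySem.List.sorted_sorted, h1]
      rw [ih (x ++ [k]) y]
      simp [hk, List.append_assoc]

-- filtering a sorted list IS the sort of the filtered list
theorem filter_sorted_eq (p : String → Bool) (l : List String) :
    PySem.List.sorted (l.filter p) (fun s => s) false
    = (PySem.List.sorted l (fun s => s) false).filter p := by
  exact PySem.List.sorted_id_eq_of_perm_of_pairwise _ _
    ((PySem.List.sorted_perm l (fun s => s) false).filter p)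
    ((PySem.List.sorted_pairwise l (fun s => s)).filter p)

-- ===== VERDICT (by name: the statement is the Claim_ definition above) =====
theorem two_teams_spec : Claim_equal_two_teams := by
  intro sailors _
  unfold Spec_two_teams two_teams two_teams_alt
  set d := PySem.Dict.ofList sailors with hd
  simp only
  have hA := foldlA_eq (fun k => 20 ≤ d.getD k 0 ∧ d.getD k 0 ≤ 40) d.keys [] []
  simp only [List.nil_append,
    show (PySem.List.sorted ([] : List String) (fun s => s) false) = [] from rfl] at hA
  rw [hA]
  rw [filter_sorted_eq, filter_sorted_eq]
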